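-- pv_equiv track=rewrite | github.com/LI12TUTU/Python | Learn_Python/algo/11-最长公共子序列.py | max_common_length
-- ===== SOURCE A (Python) =====
-- def max_common_length(str1, str2):
--   res_max_length = 0
--
--   # 第一个字串以某一个字符开头的最长字串
--   for i in range(len(str1)):
--
--     curr_max_length = 0
--     prev = 0
--
--     for j in range(i, len(str1)):
--       for k in range(prev, len(str2)):
--         if str2[k] == str1[j]:
--           curr_max_length += 1
--           # 从第二个字串的下一个位置开始扫描
--           prev = k + 1
--           break
--
--     res_max_length = max(res_max_length, curr_max_length)
--
--   return res_max_length
-- ===== SOURCE B (Python) =====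
-- def max_common_length(str1, str2):
--     m = len(str2)
--     # nxt[p] maps each character of str2[p:] to its first index >= p
--     nxt = [None] * (m + 1)
--     nxt[m] = {}
--     for p in range(m - 1, -1, -1):
--         d = dict(nxt[p + 1])
--         d[str2[p]] = p
--         nxt[p] = d
--     best = 0
--     for i in range(len(str1)):
--         cnt = 0
--         prev = 0
--         for j in range(i, len(str1)):
--             k = nxt[prev].get(str1[j], m)
--             if k < m:
--                 cnt += 1
--                 prev = k + 1
--         best = max(best, cnt)
--     return best
-- ===== Notes on version B (the rewrite author's own statement) =====
-- stated objective: faster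
-- what changed: B precomputes a next-occurrence table of str2 (built once, right to left) so each greedy match is an O(1) dictionary jump instead of A's linear rescan of str2.
import Mathlib
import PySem

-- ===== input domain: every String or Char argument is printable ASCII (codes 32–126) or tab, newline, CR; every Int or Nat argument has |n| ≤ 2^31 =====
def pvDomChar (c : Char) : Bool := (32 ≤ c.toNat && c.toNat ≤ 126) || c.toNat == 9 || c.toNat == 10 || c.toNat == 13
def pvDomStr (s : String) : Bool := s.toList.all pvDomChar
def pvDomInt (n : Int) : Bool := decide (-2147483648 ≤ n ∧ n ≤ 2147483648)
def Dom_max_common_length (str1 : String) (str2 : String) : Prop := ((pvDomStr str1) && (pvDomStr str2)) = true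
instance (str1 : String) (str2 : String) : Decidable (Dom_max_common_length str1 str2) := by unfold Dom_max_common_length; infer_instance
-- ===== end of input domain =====

-- B replaces A's inner linear rescans of str2 by one precomputed next-occurrence table, making each greedy match a dictionary jump (objective: faster).

-- ===== PORT A =====
-- inner 'for k in range(prev, len(str2)): if str2[k] == str1[j]: cnt += 1; prev = k + 1; break'
def pvScanK (s2 : List Char) (c : Char) (ks : List Int) (cnt prev : Int) : Int × Int :=
  match ks with
  | [] => (cnt, prev)
  | k :: rest =>
      if PySem.List.pyGetD s2 k ' ' = c then (cnt + 1, k + 1)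
      else pvScanK s2 c rest cnt prev

-- 'for j in range(i, len(str1)): …'
def pvLoopJ (s1 s2 : List Char) (js : List Int) (cnt prev : Int) : Int :=
  match js with
  | [] => cnt
  | j :: rest =>
      let r := pvScanK s2 (PySem.List.pyGetD s1 j ' ') (PySem.List.pyRange prev (s2.length : Int) 1) cnt prev
      pvLoopJ s1 s2 rest r.1 r.2

-- 'for i in range(len(str1)): …'
def pvLoopI (s1 s2 : List Char) (is_ : List Int) (res : Int) : Int :=
  match is_ with
  | [] => res
  | i :: rest =>
      pvLoopI s1 s2 rest (max res (pvLoopJ s1 s2 (PySem.List.pyRange i (s1.length : Int) 1) 0 0))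

def max_common_length (str1 : String) (str2 : String) : Int :=
  pvLoopI str1.toList str2.toList (PySem.List.pyRange 0 (str1.toList.length : Int) 1) 0

-- ===== PORT B =====
-- 'for p in range(m-1, -1, -1): d = dict(nxt[p+1]); d[str2[p]] = p; nxt[p] = d' built as a
-- right-to-left recursion: element at offset t is the dict for position p0 + t.
def pvBuildNxt (s2 : List Char) (p0 : Int) : List (PySem.Dict Char Int) :=
  match s2 with
  | [] => [PySem.Dict.empty]
  | c :: rest =>
      let t := pvBuildNxt rest (p0 + 1)
      (PySem.Dict.insert (t.headD PySem.Dict.empty) c p0) :: t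

-- 'for j in range(i, len(str1)): k = nxt[prev].get(str1[j], m); if k < m: cnt += 1; prev = k + 1'
def pvAltJ (s1 : List Char) (nxt : List (PySem.Dict Char Int)) (m : Int) (js : List Int) (cnt prev : Int) : Int :=
  match js with
  | [] => cnt
  | j :: rest =>
      let k := PySem.Dict.getD (PySem.List.pyGetD nxt prev PySem.Dict.empty) (PySem.List.pyGetD s1 j ' ') m
      if k < m then pvAltJ s1 nxt m rest (cnt + 1) (k + 1)
      else pvAltJ s1 nxt m rest cnt prev

def pvAltI (s1 : List Char) (nxt : List (PySem.Dict Char Int)) (m : Int) (is_ : List Int) (best : Int) : Int :=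
  match is_ with
  | [] => best
  | i :: rest =>
      pvAltI s1 nxt m rest (max best (pvAltJ s1 nxt m (PySem.List.pyRange i (s1.length : Int) 1) 0 0))

def max_common_length_alt (str1 : String) (str2 : String) : Int :=
  let s1 := str1.toList
  let s2 := str2.toList
  let m : Int := (s2.length : Int)
  let nxt := pvBuildNxt s2 0
  pvAltI s1 nxt m (PySem.List.pyRange 0 (s1.length : Int) 1) 0

-- ===== PRECONDITION & SPEC =====
def Spec_max_common_length (str1 : String) (str2 : String) (out : Int) : Prop := out = max_common_length_alt str1 str2
instance (str1 : String) (str2 : String) (out : Int) : Decidable (Spec_max_common_length str1 str2 out) := by unfold Spec_max_common_length; infer_instance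

-- ===== CLAIM (what is proved, stated in full; the proofs are below) =====
def Claim_equal_max_common_length : Prop := ∀ (str1 : String) (str2 : String), Dom_max_common_length str1 str2 → Spec_max_common_length str1 str2 (max_common_length str1 str2)

-- ===== LEMMAS AND PROOFS =====

-- first index of c in l
def pvFidx (l : List Char) (c : Char) : Option Nat := l.findIdx? (· = c)

theorem pvFidx_lt (l : List Char) (c : Char) (u : Nat) (h : pvFidx l c = some u) : u < l.length :=
  (List.findIdx?_eq_some_iff_findIdx_eq.mp h).1

-- characterization of the table: entry at offset t answers "first occurrence of c at index ≥ p0 + t"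
theorem pvBuildNxt_get? (s2 : List Char) (p0 : Int) (t : Nat) (ht : t ≤ s2.length) (c : Char) :
    ((pvBuildNxt s2 p0).getD t PySem.Dict.empty).get? c
      = (pvFidx (s2.drop t) c).map (fun u => p0 + t + u) := by
  induction s2 generalizing p0 t with
  | nil =>
      have ht0 : t = 0 := by simpa using ht
      subst ht0
      simp [pvBuildNxt, pvFidx, PySem.Dict.get?_empty]
  | cons a rest ih =>
      cases t with
      | zero =>
          have hhead : (pvBuildNxt rest (p0 + 1)).headD PySem.Dict.empty
              = (pvBuildNxt rest (p0 + 1)).getD 0 PySem.Dict.empty := by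
            cases h : pvBuildNxt rest (p0 + 1) with
            | nil => simp
            | cons d ds => simp
          simp only [pvBuildNxt, List.getD_cons_zero, hhead]
          rw [PySem.Dict.get?_insert]
          rw [ih (p0 + 1) 0 (by omega)]
          simp only [List.drop_zero, pvFidx, List.findIdx?_cons]
          by_cases hc : c = a
          · simp [hc]
          · have hdec : (decide (a = c)) = false := by simp [Ne.symm hc]
            simp only [hc, if_false, hdec, Bool.false_eq_true]
            cases rest.findIdx? (· = c) with
            | none => simp
            | some u => simp; ring
      | succ u =>
          simp only [pvBuildNxt, List.getD_cons_succ]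
          rw [ih (p0 + 1) u (by simpa using ht)]
          simp only [List.drop_succ_cons]
          cases (pvFidx (rest.drop u) c) with
          | none => simp
          | some w => simp; ring

-- A's inner scan, characterized by pvFidx (q is the Nat scan start; prev is arbitrary)
theorem pvScanK_eq (s2 : List Char) (c : Char) (cnt prev : Int) (q : Nat) (hq : q ≤ s2.length) :
    pvScanK s2 c (PySem.List.pyRange (q : Int) (s2.length : Int) 1) cnt prev
      = (match pvFidx (s2.drop q) c with
         | none => (cnt, prev)
         | some u => (cnt + 1, ((q + u + 1 : Nat) : Int))) := by
  have main : ∀ n q, s2.length - q = n → q ≤ s2.length →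
      pvScanK s2 c (PySem.List.pyRange (q : Int) (s2.length : Int) 1) cnt prev
        = (match pvFidx (s2.drop q) c with
           | none => (cnt, prev)
           | some u => (cnt + 1, ((q + u + 1 : Nat) : Int))) := by
    intro n
    induction n with
    | zero =>
        intro q hn hq
        have hqe : q = s2.length := by omega
        subst hqe
        rw [PySem.List.pyRange_one_eq_nil (by omega)]
        simp [pvScanK, pvFidx]
    | succ n ih =>
        intro q hn hq
        have hlt : q < s2.length := by omega
        rw [PySem.List.pyRange_one_cons (by exact_mod_cast hlt)]
        have hget : PySem.List.pyGetD s2 (q : Int) ' ' = s2[q] := by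
          rw [PySem.List.pyGetD_natCast]
          exact List.getD_eq_getElem s2 ' ' hlt
        have hdrop : s2.drop q = s2[q] :: s2.drop (q + 1) := List.drop_eq_getElem_cons hlt
        by_cases hc : s2[q] = c
        · have hfi : pvFidx (s2.drop q) c = some 0 := by
            rw [hdrop]; simp [pvFidx, List.findIdx?_cons, hc]
          simp only [pvScanK, hget, if_pos hc, hfi]
          norm_num
        · simp only [pvScanK, hget, if_neg hc]
          have hcast : ((q : Int) + 1) = ((q + 1 : Nat) : Int) := by push_cast; ring
          rw [hcast, ih (q + 1) (by omega) (by omega), hdrop]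
          have hdec : (decide (s2[q] = c)) = false := by simp [hc]
          simp only [pvFidx, List.findIdx?_cons, hdec, Bool.false_eq_true, if_false]
          cases hfi : (s2.drop (q + 1)).findIdx? (· = c) with
          | none => simp
          | some u =>
              simp only [Option.map_some]
              congr 1
              push_cast; ring
  exact main (s2.length - q) q rfl hq

-- B's step: the table lookup computes the same first-occurrence jump
theorem pvAlt_step (s2 : List Char) (c : Char) (p : Nat) (hp : p ≤ s2.length) :
    PySem.Dict.getD (PySem.List.pyGetD (pvBuildNxt s2 0) (p : Int) PySem.Dict.empty) c (s2.length : Int)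
      = (match pvFidx (s2.drop p) c with
         | none => (s2.length : Int)
         | some u => ((p + u : Nat) : Int)) := by
  rw [PySem.List.pyGetD_natCast, PySem.Dict.getD_eq_get?_getD, pvBuildNxt_get? s2 0 p hp c]
  cases h : pvFidx (s2.drop p) c with
  | none => simp
  | some u => simp

-- inner loops agree (prev tracked as a Nat p ≤ |s2|)
theorem pvLoopJ_eq_altJ (s1 s2 : List Char) (js : List Int) (cnt : Int) (p : Nat) (hp : p ≤ s2.length) :
    pvLoopJ s1 s2 js cnt (p : Int)
      = pvAltJ s1 (pvBuildNxt s2 0) (s2.length : Int) js cnt (p : Int) := by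
  induction js generalizing cnt p with
  | nil => rfl
  | cons j rest ih =>
      simp only [pvLoopJ, pvAltJ]
      rw [pvScanK_eq s2 _ cnt (p : Int) p hp, pvAlt_step s2 _ p hp]
      cases h : pvFidx (s2.drop p) (PySem.List.pyGetD s1 j ' ') with
      | none =>
          dsimp only
          rw [if_neg (by omega)]
          exact ih cnt p hp
      | some u =>
          have hu : u < s2.length - p := by
            have := pvFidx_lt _ _ _ h
            simpa [List.length_drop] using this
          dsimp only
          rw [if_pos (by exact_mod_cast (by omega : p + u < s2.length))]
          have hc : ((p + u : Nat) : Int) + 1 = ((p + u + 1 : Nat) : Int) := by push_cast; ring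
          rw [hc]
          exact ih (cnt + 1) (p + u + 1) (by omega)

-- the inner-loop agreement at the loop entry prev = 0
theorem pvLoopJ_eq_altJ_zero (s1 s2 : List Char) (js : List Int) :
    pvLoopJ s1 s2 js 0 0 = pvAltJ s1 (pvBuildNxt s2 0) (s2.length : Int) js 0 0 := by
  have h := pvLoopJ_eq_altJ s1 s2 js 0 0 (Nat.zero_le _)
  simpa using h

-- outer loops agree
theorem pvLoopI_eq_altI (s1 s2 : List Char) (is_ : List Int) (res : Int) :
    pvLoopI s1 s2 is_ res = pvAltI s1 (pvBuildNxt s2 0) (s2.length : Int) is_ res := by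
  induction is_ generalizing res with
  | nil => rfl
  | cons i rest ih =>
      simp only [pvLoopI, pvAltI]
      rw [pvLoopJ_eq_altJ_zero]
      exact ih _

-- ===== VERDICT (by name: the statement is the Claim_ definition above) =====
theorem max_common_length_spec : Claim_equal_max_common_length := by
  intro str1 str2 _
  unfold Spec_max_common_length max_common_length max_common_length_alt
  exact pvLoopI_eq_altI _ _ _ _
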